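-- pv_equiv track=rewrite | github.com/Sueloattack/AutomatizadorSOAT | Automatizaciones/glosas/mundial_escolar.py | _determinar_lote_y_radicabilidad
-- ===== SOURCE A (Python) =====
-- def _determinar_lote_y_radicabilidad(items_api_completos: list) -> tuple[bool, str, list | None]:
--     """
--     Función interna con lógica de negocio actualizada para determinar si una glosa se puede radicar.
--     - Estados RADICABLES: C1, C2, C3, CO, AI
--     - Estados NO RADICABLES (INICIAN): NU
--     - Estados de BLOQUEO: R..., AE
--     """
--     if not items_api_completos:
--         return False, "No se encontró historial de ítems en glo_det.", None
--
--     # El último evento en la línea de tiempo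
--     ultimo_evento = items_api_completos[-1]
--     ultimo_estado = ultimo_evento['estatus1'].strip().upper()
--
--     # REGLA 1: Si el último estado es una Ratificación (R), está bloqueada.
--     if ultimo_estado.startswith('R'):
--         return False, f"No radicable: Pendiente de respuesta interna (último estado es '{ultimo_estado}').", None
--
--     # REGLA 2: Si está Aceptada por Aseguradora (AE), el proceso terminó.
--     if ultimo_estado == 'AE':
--         return False, f"No radicable: La glosa ya está en estado final 'AE'.", None
--
--     # Identificar el estado del último lote que requiere nuestra acción.
--     # El orden de búsqueda es importante para encontrar el lote correcto.
--     # CO es el último posible, luego C3, C2, C1, AI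
--     ultimo_lote_estado = None
--     estados_que_podemos_contestar = ['CO', 'C3', 'C2', 'C1', 'AI']
--
--     # Agrupamos los estados por cada fecha para entender los "eventos"
--     estados_en_historial = {item['estatus1'].strip().upper() for item in items_api_completos}
--
--     for estado_posible in estados_que_podemos_contestar:
--         if estado_posible in estados_en_historial:
--              # Este es el grupo más reciente que podemos/debemos contestar
--              ultimo_lote_estado = estado_posible
--              break
--
--     if not ultimo_lote_estado:
--          return False, "No se encontró un lote de ítems válido para procesar.", None
--
--     # Si el último lote válido es NU, es una glosa nueva. Aún no se puede radicar respuesta.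
--     # El proceso debería ser: contestar internamente para que pase a C1.
--     if ultimo_lote_estado == 'NU':
--         return False, "No radicable: La glosa es nueva (NU) y requiere una primera respuesta interna.", None
--
--     # Si llegamos aquí, encontramos un lote C..., CO o AI que podemos radicar.
--     # Filtramos los ítems que pertenecen a ese lote
--     lote_a_radicar = [item for item in items_api_completos if item['estatus1'].strip().upper() == ultimo_lote_estado]
--
--     motivo = f"Radicable. Se procesará el lote de ítems con estado '{ultimo_lote_estado}'."
--     return True, motivo, lote_a_radicar
-- ===== SOURCE B (Python) =====
-- _RANK = {'CO': 0, 'C3': 1, 'C2': 2, 'C1': 3, 'AI': 4}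
-- _CANDIDATOS = ('CO', 'C3', 'C2', 'C1', 'AI')
--
-- def _norm(item):
--     return item['estatus1'].strip().upper()
--
-- def _determinar_lote_y_radicabilidad(items_api_completos: list) -> tuple[bool, str, list | None]:
--     if not items_api_completos:
--         return False, "No se encontró historial de ítems en glo_det.", None
--     ultimo_estado = _norm(items_api_completos[-1])
--     if ultimo_estado.startswith('R'):
--         return False, f"No radicable: Pendiente de respuesta interna (último estado es '{ultimo_estado}').", None
--     if ultimo_estado == 'AE':
--         return False, "No radicable: La glosa ya está en estado final 'AE'.", None
--     best = 5
--     for item in items_api_completos: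
--         r = _RANK.get(_norm(item), 5)
--         if r < best:
--             best = r
--     if best == 5:
--         return False, "No se encontró un lote de ítems válido para procesar.", None
--     ultimo_lote_estado = _CANDIDATOS[best]
--     lote_a_radicar = [item for item in items_api_completos if _norm(item) == ultimo_lote_estado]
--     return True, f"Radicable. Se procesará el lote de ítems con estado '{ultimo_lote_estado}'.", lote_a_radicar
-- ===== Notes on version B (the rewrite author's own statement) =====
-- stated objective: alternative
-- what changed: Replaces A's set-of-seen-states construction followed by a scan of the candidate priority list with a single pass over the items that keeps the minimum priority rank (CO=0,C3=1,C2=2,C1=3,AI=4) and indexes the candidate table by it, dropping the unreachable NU branch; guards, messages and the final filter are unchanged.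
import Mathlib
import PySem

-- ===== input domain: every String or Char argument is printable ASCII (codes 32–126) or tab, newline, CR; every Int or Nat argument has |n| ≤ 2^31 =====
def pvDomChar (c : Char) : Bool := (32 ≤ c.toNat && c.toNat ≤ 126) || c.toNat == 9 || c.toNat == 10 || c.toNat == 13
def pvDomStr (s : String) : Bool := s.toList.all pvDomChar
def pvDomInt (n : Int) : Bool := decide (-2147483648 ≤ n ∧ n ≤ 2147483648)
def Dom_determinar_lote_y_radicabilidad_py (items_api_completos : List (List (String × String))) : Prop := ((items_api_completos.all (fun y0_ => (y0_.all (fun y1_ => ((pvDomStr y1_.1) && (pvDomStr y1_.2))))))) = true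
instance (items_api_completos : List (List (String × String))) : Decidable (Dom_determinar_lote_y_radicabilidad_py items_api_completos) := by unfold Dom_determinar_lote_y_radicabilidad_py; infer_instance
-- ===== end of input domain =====

-- B replaces A's seen-states set + candidate-priority scan with one min-rank pass over the items
-- (alternative decomposition, same cost); guards, messages and the final filter are unchanged.
-- ===== PORT A =====
-- item['estatus1'].strip().upper() (shared literal subexpression of both Pythons; getD "" is
-- unreachable under Pre_, where every lookup succeeds)
def pyNorm (item : List (String × String)) : String :=
  PySem.Str.upper (PySem.Str.strip (((PySem.Dict.ofList item).get? "estatus1").getD ""))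

-- A's 'for estado_posible in estados_que_podemos_contestar: if … break' loop
def aFindLote : List String → PySem.Set String → Option String
  | [], _ => none
  | c :: rest, s => if PySem.Set.contains s c then some c else aFindLote rest s

def determinar_lote_y_radicabilidad_py (items_api_completos : List (List (String × String))) : Bool × String × (Option (List (List (String × String)))) :=
  if items_api_completos.isEmpty then
    (false, "No se encontró historial de ítems en glo_det.", none)
  else
    -- ultimo_evento = items[-1]; ultimo_estado = pyNorm of it (inlined)
    if PySem.Str.startswith (pyNorm ((PySem.List.pyGet? items_api_completos (-1)).getD [])) "R" then
      (false, "No radicable: Pendiente de respuesta interna (último estado es '" ++ pyNorm ((PySem.List.pyGet? items_api_completos (-1)).getD []) ++ "').", none)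
    else if pyNorm ((PySem.List.pyGet? items_api_completos (-1)).getD []) = "AE" then
      (false, "No radicable: La glosa ya está en estado final 'AE'.", none)
    else
      match aFindLote ["CO", "C3", "C2", "C1", "AI"] (PySem.Set.ofList (items_api_completos.map pyNorm)) with
      | none => (false, "No se encontró un lote de ítems válido para procesar.", none)
      | some ultimo_lote_estado =>
        if ultimo_lote_estado = "NU" then
          (false, "No radicable: La glosa es nueva (NU) y requiere una primera respuesta interna.", none)
        else
          (true, "Radicable. Se procesará el lote de ítems con estado '" ++ ultimo_lote_estado ++ "'.",
           some (items_api_completos.filter (fun it => pyNorm it == ultimo_lote_estado)))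

-- ===== PORT B =====
def bRank (s : String) : Int :=
  PySem.Dict.getD (PySem.Dict.ofList [("CO", (0 : Int)), ("C3", 1), ("C2", 2), ("C1", 3), ("AI", 4)]) s 5

def determinar_lote_y_radicabilidad_py_alt (items_api_completos : List (List (String × String))) : Bool × String × (Option (List (List (String × String)))) :=
  if items_api_completos.isEmpty then
    (false, "No se encontró historial de ítems en glo_det.", none)
  else
    if PySem.Str.startswith (pyNorm ((PySem.List.pyGet? items_api_completos (-1)).getD [])) "R" then
      (false, "No radicable: Pendiente de respuesta interna (último estado es '" ++ pyNorm ((PySem.List.pyGet? items_api_completos (-1)).getD []) ++ "').", none)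
    else if pyNorm ((PySem.List.pyGet? items_api_completos (-1)).getD []) = "AE" then
      (false, "No radicable: La glosa ya está en estado final 'AE'.", none)
    else
      if items_api_completos.foldl (fun b it => let r := bRank (pyNorm it); if r < b then r else b) 5 = 5 then
        (false, "No se encontró un lote de ítems válido para procesar.", none)
      else
        (true, "Radicable. Se procesará el lote de ítems con estado '" ++ (PySem.List.pyGet? ["CO", "C3", "C2", "C1", "AI"] (items_api_completos.foldl (fun b it => let r := bRank (pyNorm it); if r < b then r else b) 5)).getD "" ++ "'.",
         some (items_api_completos.filter (fun it => pyNorm it == (PySem.List.pyGet? ["CO", "C3", "C2", "C1", "AI"] (items_api_completos.foldl (fun b it => let r := bRank (pyNorm it); if r < b then r else b) 5)).getD "")))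

-- ===== PRECONDITION & SPEC =====
-- Pre_ excludes exactly the inputs where the Python A raises KeyError: some item lacks key
-- 'estatus1' and A reaches the lookup (the last item's lookup, or the history scan past the guards).
def Pre_determinar_lote_y_radicabilidad_py (items_api_completos : List (List (String × String))) : Prop :=
  ((items_api_completos.all fun it => ((PySem.Dict.ofList it).get? "estatus1").isSome) ||
   (match items_api_completos.getLast? with
    | none => false
    | some last => ((PySem.Dict.ofList last).get? "estatus1").isSome &&
        (PySem.Str.startswith (pyNorm last) "R" || pyNorm last == "AE"))) = true
instance (items_api_completos : List (List (String × String))) : Decidable (Pre_determinar_lote_y_radicabilidad_py items_api_completos) := by unfold Pre_determinar_lote_y_radicabilidad_py; infer_instance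

def pvWitness_determinar_lote_y_radicabilidad_py : (List (List (String × String))) :=
  [[("estatus1", "c1 "), ("valor", "100")], [("estatus1", "C2")]]

def Spec_determinar_lote_y_radicabilidad_py (items_api_completos : List (List (String × String))) (out : Bool × String × (Option (List (List (String × String))))) : Prop := out = determinar_lote_y_radicabilidad_py_alt items_api_completos
instance (items_api_completos : List (List (String × String))) (out : Bool × String × (Option (List (List (String × String))))) : Decidable (Spec_determinar_lote_y_radicabilidad_py items_api_completos out) := by unfold Spec_determinar_lote_y_radicabilidad_py; infer_instance

-- ===== CLAIM (what is proved, stated in full; the proofs are below) =====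
def Claim_equal_determinar_lote_y_radicabilidad_py : Prop := ∀ (items_api_completos : List (List (String × String))), Dom_determinar_lote_y_radicabilidad_py items_api_completos → Pre_determinar_lote_y_radicabilidad_py items_api_completos → Spec_determinar_lote_y_radicabilidad_py items_api_completos (determinar_lote_y_radicabilidad_py items_api_completos)

-- ===== LEMMAS AND PROOFS =====
set_option maxHeartbeats 2000000 in
theorem pvWitness_ok : Dom_determinar_lote_y_radicabilidad_py pvWitness_determinar_lote_y_radicabilidad_py ∧ Pre_determinar_lote_y_radicabilidad_py pvWitness_determinar_lote_y_radicabilidad_py := by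
  decide

theorem bRank_eq (s : String) : bRank s =
    if s = "AI" then 4 else if s = "C1" then 3 else if s = "C2" then 2
    else if s = "C3" then 1 else if s = "CO" then 0 else 5 := by
  simp [bRank, PySem.Dict.ofList, PySem.Dict.update, List.foldl, PySem.Dict.getD_insert, PySem.Dict.getD_empty]

theorem foldl_min_cons (g : String → Int) (b r : Int) (L : List String) :
    L.foldl (fun b s => min b (g s)) (min b r) = min r (L.foldl (fun b s => min b (g s)) b) := by
  induction L generalizing b with
  | nil => simp [min_comm]
  | cons x xs ih =>
    simp only [List.foldl]
    rw [min_right_comm, ih]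

set_option maxHeartbeats 1000000 in
theorem m_spec (L : List String) :
    L.foldl (fun b s => min b (bRank s)) 5 =
      if "CO" ∈ L then 0 else if "C3" ∈ L then 1 else if "C2" ∈ L then 2
      else if "C1" ∈ L then 3 else if "AI" ∈ L then 4 else 5 := by
  induction L with
  | nil => simp
  | cons s L ih =>
    have h1 : (s :: L).foldl (fun b s => min b (bRank s)) 5
        = min (bRank s) (L.foldl (fun b s => min b (bRank s)) 5) := by
      simpa using foldl_min_cons bRank 5 (bRank s) L
    rw [h1, ih, bRank_eq s]
    clear h1 ih
    simp only [List.mem_cons]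
    by_cases e1 : s = "CO" <;> by_cases e2 : s = "C3" <;> by_cases e3 : s = "C2" <;>
      by_cases e4 : s = "C1" <;> by_cases e5 : s = "AI" <;>
      simp_all [min_def] <;> split_ifs <;> intros <;> first | omega | simp_all

theorem sel_eq (L : List String) :
    aFindLote ["CO", "C3", "C2", "C1", "AI"] (PySem.Set.ofList L) =
      (if L.foldl (fun b s => min b (bRank s)) 5 = 5 then none
       else some ((PySem.List.pyGet? ["CO", "C3", "C2", "C1", "AI"]
                     (L.foldl (fun b s => min b (bRank s)) 5)).getD "")) := by
  rw [m_spec]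
  by_cases hCO : "CO" ∈ L <;> by_cases hC3 : "C3" ∈ L <;> by_cases hC2 : "C2" ∈ L <;>
    by_cases hC1 : "C1" ∈ L <;> by_cases hAI : "AI" ∈ L <;>
    simp [aFindLote, hCO, hC3, hC2, hC1, hAI, PySem.List.pyGet?, PySem.List.pyIdx?]

theorem fold_bridge (items : List (List (String × String))) (b : Int) :
    items.foldl (fun b it => let r := bRank (pyNorm it); if r < b then r else b) b =
      (items.map pyNorm).foldl (fun b s => min b (bRank s)) b := by
  induction items generalizing b with
  | nil => rfl
  | cons x xs ih =>
      simp only [List.foldl_cons, List.map_cons]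
      rw [ih]
      have h : (if bRank (pyNorm x) < b then bRank (pyNorm x) else b) = min b (bRank (pyNorm x)) := by
        rw [min_def]; split_ifs <;> omega
      rw [h]

-- ===== VERDICT (by name: the statement is the Claim_ definition above) =====
theorem determinar_lote_y_radicabilidad_py_spec : Claim_equal_determinar_lote_y_radicabilidad_py := by
  intro items _ _
  unfold Spec_determinar_lote_y_radicabilidad_py
  unfold determinar_lote_y_radicabilidad_py determinar_lote_y_radicabilidad_py_alt
  split_ifs with h0 hR hAE h5
  · rfl
  · rfl
  · rfl
  · have h5' : (items.map pyNorm).foldl (fun b s => min b (bRank s)) 5 = 5 := by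
      rw [← fold_bridge]; exact h5
    simp [sel_eq, h5']
  · have hmem : (items.map pyNorm).foldl (fun b s => min b (bRank s)) 5 = 0 ∨
        (items.map pyNorm).foldl (fun b s => min b (bRank s)) 5 = 1 ∨
        (items.map pyNorm).foldl (fun b s => min b (bRank s)) 5 = 2 ∨
        (items.map pyNorm).foldl (fun b s => min b (bRank s)) 5 = 3 ∨
        (items.map pyNorm).foldl (fun b s => min b (bRank s)) 5 = 4 ∨
        (items.map pyNorm).foldl (fun b s => min b (bRank s)) 5 = 5 := by
      rw [m_spec]; split_ifs <;> simp
    have h5' : ¬ (items.map pyNorm).foldl (fun b s => min b (bRank s)) 5 = 5 := by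
      rw [← fold_bridge]; exact h5
    rcases hmem with h | h | h | h | h | h <;>
      first
        | exact absurd h h5'
        | simp [sel_eq, fold_bridge, h, PySem.List.pyGet?, PySem.List.pyIdx?]
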